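-- pv_equiv track=rewrite | github.com/hwi1018/CodingTest_Python | D-Day_1308.py | GetYear1000Days
-- ===== SOURCE A (Python) =====
-- def GetYear1000Days(start_year):
--     day = 0
--     for y in range(start_year, start_year+1000):
--         if(y % 400==0):
--             day += 366
--         elif(y % 100 ==0):
--             day += 365
--         elif(y % 4 ==0):
--             day +=366
--         else:
--             day +=365
--     return day
-- ===== SOURCE B (Python) =====
-- def GetYear1000Days(start_year):
--     # closed form: 365 per year plus one extra day per leap year in
--     # [start_year, start_year+999], counted via f(n) = n//4 - n//100 + n//400
--     def f(n):
--         return n // 4 - n // 100 + n // 400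
--     return 365 * 1000 + f(start_year + 999) - f(start_year - 1)
-- ===== Notes on version B (the rewrite author's own statement) =====
-- stated objective: simpler
-- what changed: Replaces the year-by-year leap-day loop with a closed-form expression: days per year times the span plus the number of leap years in the interval, counted by the standard Gregorian floor-division formula at the interval endpoints.
import Mathlib
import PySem

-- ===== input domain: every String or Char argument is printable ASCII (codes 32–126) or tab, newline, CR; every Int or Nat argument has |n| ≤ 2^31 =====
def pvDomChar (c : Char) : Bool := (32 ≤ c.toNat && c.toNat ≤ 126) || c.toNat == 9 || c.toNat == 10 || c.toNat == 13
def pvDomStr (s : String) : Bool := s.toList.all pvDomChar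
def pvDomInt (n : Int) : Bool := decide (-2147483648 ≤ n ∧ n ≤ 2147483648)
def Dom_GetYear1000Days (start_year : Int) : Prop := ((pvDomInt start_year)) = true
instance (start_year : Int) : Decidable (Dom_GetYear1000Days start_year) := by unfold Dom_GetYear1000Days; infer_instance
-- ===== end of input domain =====

-- B computes the same total by a closed-form leap-year count instead of the loop (simpler, no iteration).

-- ===== PORT A =====
def GetYear1000Days (start_year : Int) : Int :=
  (PySem.List.pyRange start_year (start_year + 1000) 1).foldl
    (fun day y =>
      if PySem.Int.mod y 400 = 0 then day + 366
      else if PySem.Int.mod y 100 = 0 then day + 365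
      else if PySem.Int.mod y 4 = 0 then day + 366
      else day + 365) 0

-- ===== PORT B =====
def pvLeapCount (n : Int) : Int :=
  PySem.Int.floordiv n 4 - PySem.Int.floordiv n 100 + PySem.Int.floordiv n 400

def GetYear1000Days_alt (start_year : Int) : Int :=
  365 * 1000 + pvLeapCount (start_year + 999) - pvLeapCount (start_year - 1)

-- ===== PRECONDITION & SPEC =====
def Spec_GetYear1000Days (start_year : Int) (out : Int) : Prop := out = GetYear1000Days_alt start_year
instance (start_year : Int) (out : Int) : Decidable (Spec_GetYear1000Days start_year out) := by unfold Spec_GetYear1000Days; infer_instance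

-- ===== CLAIM (what is proved, stated in full; the proofs are below) =====
def Claim_equal_GetYear1000Days : Prop := ∀ (start_year : Int), Dom_GetYear1000Days start_year → Spec_GetYear1000Days start_year (GetYear1000Days start_year)

-- ===== LEMMAS AND PROOFS =====

-- one loop step adds 365 plus the leap indicator, which telescopes through pvLeapCount
theorem pvStep (d y : Int) :
    (if PySem.Int.mod y 400 = 0 then d + 366
     else if PySem.Int.mod y 100 = 0 then d + 365
     else if PySem.Int.mod y 4 = 0 then d + 366
     else d + 365) = d + 365 + (pvLeapCount y - pvLeapCount (y - 1)) := by
  unfold pvLeapCount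
  simp only [PySem.Int.mod_eq_emod_of_pos (b := 400) (by norm_num),
             PySem.Int.mod_eq_emod_of_pos (b := 100) (by norm_num),
             PySem.Int.mod_eq_emod_of_pos (b := 4) (by norm_num),
             PySem.Int.floordiv_eq_ediv_of_pos (b := 400) (by norm_num),
             PySem.Int.floordiv_eq_ediv_of_pos (b := 100) (by norm_num),
             PySem.Int.floordiv_eq_ediv_of_pos (b := 4) (by norm_num)]
  split_ifs <;> omega

-- loop invariant: the fold over range(a, a+n) telescopes to the closed form
theorem pvLoop (a : Int) (n : Nat) (d : Int) :
    (PySem.List.pyRange a (a + n) 1).foldl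
      (fun day y =>
        if PySem.Int.mod y 400 = 0 then day + 366
        else if PySem.Int.mod y 100 = 0 then day + 365
        else if PySem.Int.mod y 4 = 0 then day + 366
        else day + 365) d
    = d + 365 * n + pvLeapCount (a + n - 1) - pvLeapCount (a - 1) := by
  induction n with
  | zero => simp [PySem.List.pyRange]
  | succ m ih =>
      have h : (a : Int) ≤ a + m := by omega
      have : (a : Int) + (m + 1 : Nat) = (a + m) + 1 := by push_cast; ring
      rw [this, PySem.List.pyRange_one_succ_right h, List.foldl_append]
      simp only [List.foldl]
      rw [ih, pvStep]
      push_cast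
      ring_nf

-- ===== VERDICT (by name: the statement is the Claim_ definition above) =====
theorem GetYear1000Days_spec : Claim_equal_GetYear1000Days := by
  intro s _
  unfold Spec_GetYear1000Days GetYear1000Days GetYear1000Days_alt
  rw [show (s + 1000 : Int) = s + ((1000 : Nat) : Int) from by push_cast; ring,
      pvLoop s 1000 0]
  push_cast
  ring_nf
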